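-- pv_equiv track=rewrite | github.com/MaggiCoder16/Codunot---a-discord-bot | slash_commands.py | _compact_message_for_prompt
-- ===== SOURCE A (Python) =====
-- def _compact_message_for_prompt(text: str, max_len: int = 180) -> str:
-- 	clean = " ".join((text or "").split())
-- 	if not clean:
-- 		return ""
-- 	tokens = clean.split(" ")
-- 	compacted: list[str] = []
-- 	last = None
-- 	repeat_count = 0
-- 	for token in tokens:
-- 		if token == last:
-- 			repeat_count += 1
-- 			if repeat_count <= 3:
-- 				compacted.append(token)
-- 			continue
-- 		last = token
-- 		repeat_count = 1
-- 		compacted.append(token)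
-- 	result = " ".join(compacted)
-- 	if len(result) > max_len:
-- 		return result[:max_len].rstrip() + "..."
-- 	return result
-- ===== SOURCE B (Python) =====
-- def _compact_message_for_prompt(text: str, max_len: int = 180) -> str:
--     clean = " ".join((text or "").split())
--     if not clean:
--         return ""
--     tokens = clean.split(" ")
--     out: list[str] = []
--     i = 0
--     n = len(tokens)
--     while i < n:
--         head = tokens[i]
--         j = i + 1
--         while j < n and tokens[j] == head:
--             j += 1
--         out.extend([head] * min(j - i, 3))
--         i = j
--     result = " ".join(out)
--     if len(result) > max_len:
--         return result[:max_len].rstrip() + "..."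
--     return result
-- ===== Notes on version B (the rewrite author's own statement) =====
-- stated objective: alternative
-- what changed: Replaces the stateful last/repeat_count token-by-token scan with a two-pointer run-grouping loop that locates each run of equal tokens at once and emits min(run,3) copies of its token.
import Mathlib
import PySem

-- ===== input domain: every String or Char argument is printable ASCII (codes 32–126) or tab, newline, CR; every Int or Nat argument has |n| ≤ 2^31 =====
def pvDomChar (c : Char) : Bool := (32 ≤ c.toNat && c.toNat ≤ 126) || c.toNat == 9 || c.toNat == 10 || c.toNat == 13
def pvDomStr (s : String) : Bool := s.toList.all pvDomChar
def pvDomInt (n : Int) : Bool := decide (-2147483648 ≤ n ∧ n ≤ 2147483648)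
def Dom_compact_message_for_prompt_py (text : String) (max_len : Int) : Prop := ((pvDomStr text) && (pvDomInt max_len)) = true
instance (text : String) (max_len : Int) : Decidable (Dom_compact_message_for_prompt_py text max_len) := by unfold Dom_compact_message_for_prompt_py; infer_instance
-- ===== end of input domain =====

-- B replaces A's stateful last/repeat_count scan by a two-pointer run-grouping loop (alternative decomposition, same cost).

-- ===== PORT A =====
-- the loop body of A's 'for token in tokens' (compacted, last, repeat_count)
def pvAStep (st : List String × Option String × Int) (token : String) :
    List String × Option String × Int :=
  let compacted := st.1
  let last := st.2.1
  let repeat_count := st.2.2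
  if some token == last then
    let rc := repeat_count + 1
    (if rc ≤ 3 then compacted ++ [token] else compacted, last, rc)
  else
    (compacted ++ [token], some token, 1)

def compact_message_for_prompt_py (text : String) (max_len : Int) : String :=
  let clean := PySem.Str.join " " (PySem.Str.split₀ (if text == "" then "" else text))
  if clean == "" then ""
  else
    let tokens := (PySem.Str.split? clean " ").getD []
    let st := tokens.foldl pvAStep ([], none, 0)
    let result := PySem.Str.join " " st.1
    if PySem.Str.len result > max_len then
      PySem.Str.rstrip (PySem.Str.slice result none (some max_len)) ++ "..."
    else result

-- ===== PORT B =====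
-- inner while loop: advance j while tokens[j] == head
def pvBInner (tokens : List String) (head : String) (j : Nat) : Nat :=
  if h : j < tokens.length then
    if tokens[j] == head then pvBInner tokens head (j + 1) else j
  else j
termination_by tokens.length - j

-- needed by pvBOuter's termination: the inner loop never moves j backwards
theorem pvBInner_ge (tokens : List String) (head : String) (j : Nat) :
    j ≤ pvBInner tokens head j := by
  fun_induction pvBInner tokens head j with
  | case1 j h hb ih => omega
  | case2 j h hb => exact le_refl _
  | case3 j h => exact le_refl _

-- outer while loop: consume the run [i, j) and emit min(j - i, 3) copies of its token
def pvBOuter (tokens : List String) (out : List String) (i : Nat) : List String :=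
  if h : i < tokens.length then
    let head := tokens[i]
    let j := pvBInner tokens head (i + 1)
    pvBOuter tokens (out ++ List.replicate (min (j - i) 3) head) j
  else out
termination_by tokens.length - i
decreasing_by
  have := pvBInner_ge tokens tokens[i] (i + 1)
  omega

def compact_message_for_prompt_py_alt (text : String) (max_len : Int) : String :=
  let clean := PySem.Str.join " " (PySem.Str.split₀ (if text == "" then "" else text))
  if clean == "" then ""
  else
    let tokens := (PySem.Str.split? clean " ").getD []
    let out := pvBOuter tokens [] 0
    let result := PySem.Str.join " " out
    if PySem.Str.len result > max_len then
      PySem.Str.rstrip (PySem.Str.slice result none (some max_len)) ++ "..."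
    else result

-- ===== PRECONDITION & SPEC =====
def Spec_compact_message_for_prompt_py (text : String) (max_len : Int) (out : String) : Prop := out = compact_message_for_prompt_py_alt text max_len
instance (text : String) (max_len : Int) (out : String) : Decidable (Spec_compact_message_for_prompt_py text max_len out) := by unfold Spec_compact_message_for_prompt_py; infer_instance

-- ===== CLAIM (what is proved, stated in full; the proofs are below) =====
def Claim_equal_compact_message_for_prompt_py : Prop := ∀ (text : String) (max_len : Int), Dom_compact_message_for_prompt_py text max_len → Spec_compact_message_for_prompt_py text max_len (compact_message_for_prompt_py text max_len)

-- ===== LEMMAS AND PROOFS =====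

-- length of the run of `head` at the front of a list (ghost, proofs only)
def pvCountRun (head : String) : List String → Nat
  | [] => 0
  | x :: xs => if x == head then pvCountRun head xs + 1 else 0

-- list-suffix view of B's outer loop (ghost, proofs only)
def pvBList (out : List String) : List String → List String
  | [] => out
  | t :: rest =>
      pvBList (out ++ List.replicate (min (pvCountRun t rest + 1) 3) t)
        (rest.drop (pvCountRun t rest))
termination_by l => l.length
decreasing_by
  simp only [List.length_cons]
  have := List.length_drop (l := rest) (i := pvCountRun t rest)
  omega

theorem pvBInner_eq (tokens : List String) (head : String) (j : Nat) :
    pvBInner tokens head j = j + pvCountRun head (tokens.drop j) := by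
  fun_induction pvBInner tokens head j with
  | case1 j h hb ih =>
      rw [List.drop_eq_getElem_cons h]
      simp [pvCountRun, hb, ih]; omega
  | case2 j h hb =>
      rw [List.drop_eq_getElem_cons h]
      simp [pvCountRun, hb]
  | case3 j h =>
      rw [List.drop_of_length_le (by omega)]
      simp [pvCountRun]

theorem pvBOuter_eq (tokens : List String) (out : List String) (i : Nat) :
    pvBOuter tokens out i = pvBList out (tokens.drop i) := by
  fun_induction pvBOuter tokens out i with
  | case1 out i h head j ih =>
      have hj : j = (i + 1) + pvCountRun head (tokens.drop (i + 1)) :=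
        pvBInner_eq tokens head (i + 1)
      have hd : tokens.drop i = head :: tokens.drop (i + 1) := List.drop_eq_getElem_cons h
      rw [ih, hd, pvBList]
      have hji : min (j - i) 3 = min (pvCountRun head (tokens.drop (i + 1)) + 1) 3 := by omega
      have hdj : tokens.drop j = (tokens.drop (i + 1)).drop (pvCountRun head (tokens.drop (i + 1))) := by
        rw [hj, List.drop_drop]
      rw [hji, hdj]
  | case2 i h =>
      rw [List.drop_of_length_le (by omega), pvBList]

-- A's fold from an in-run state (acc, some t, rc) equals B's run-grouping continuation
theorem pvG (rest : List String) (t : String) (rc : Int) (acc : List String) (hrc : 1 ≤ rc) :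
    (rest.foldl pvAStep (acc, some t, rc)).1 =
      pvBList (acc ++ List.replicate (min (pvCountRun t rest) (3 - rc).toNat) t)
        (rest.drop (pvCountRun t rest)) := by
  induction rest generalizing t rc acc with
  | nil => simp [pvCountRun, pvBList]
  | cons x xs ih =>
      by_cases hx : x = t
      · subst hx
        have hstep : pvAStep (acc, some x, rc) x =
            (if rc + 1 ≤ 3 then acc ++ [x] else acc, some x, rc + 1) := by
          simp [pvAStep]
        rw [List.foldl_cons, hstep, ih x (rc + 1) _ (by omega)]
        simp only [pvCountRun, beq_self_eq_true, if_true, List.drop_succ_cons]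
        by_cases h3 : rc + 1 ≤ 3
        · simp only [h3, if_true]
          congr 1
          have hmin : min (pvCountRun x xs + 1) (3 - rc).toNat
              = min (pvCountRun x xs) (3 - (rc + 1)).toNat + 1 := by
            have h2 : rc ≤ 2 := by omega
            omega
          rw [hmin, List.replicate_succ, List.append_assoc]
          rfl
        · simp only [h3, if_false]
          have hmin : min (pvCountRun x xs) (3 - (rc + 1)).toNat
              = min (pvCountRun x xs + 1) (3 - rc).toNat := by omega
          rw [hmin]
      · have hstep : pvAStep (acc, some t, rc) x = (acc ++ [x], some x, 1) := by
          simp [pvAStep, hx]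
        rw [List.foldl_cons, hstep, ih x 1 _ (by omega)]
        have hcr : pvCountRun t (x :: xs) = 0 := by
          simp [pvCountRun, hx]
        rw [hcr]
        simp only [Nat.min_eq_left (Nat.zero_le _), List.replicate_zero,
          List.append_nil, List.drop_zero]
        rw [pvBList]
        congr 1
        have hmin : min (pvCountRun x xs + 1) 3 = min (pvCountRun x xs) (3 - (1:Int)).toNat + 1 := by
          omega
        rw [hmin, List.replicate_succ, List.append_assoc]
        rfl

theorem pvMain (tokens : List String) :
    (tokens.foldl pvAStep ([], none, 0)).1 = pvBOuter tokens [] 0 := by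
  rw [pvBOuter_eq, List.drop_zero]
  cases tokens with
  | nil => simp [pvBList]
  | cons t rest =>
      have hstep : pvAStep (([] : List String), (none : Option String), (0 : Int)) t =
          ([t], some t, 1) := by
        simp [pvAStep]
      rw [List.foldl_cons, hstep, pvG rest t 1 [t] (by omega), pvBList]
      congr 1
      have hmin : min (pvCountRun t rest + 1) 3 = min (pvCountRun t rest) (3 - (1:Int)).toNat + 1 := by
        omega
      rw [hmin, List.replicate_succ]
      rfl

-- ===== VERDICT (by name: the statement is the Claim_ definition above) =====
theorem compact_message_for_prompt_py_spec : Claim_equal_compact_message_for_prompt_py := by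
  intro text max_len _
  unfold Spec_compact_message_for_prompt_py compact_message_for_prompt_py compact_message_for_prompt_py_alt
  simp only [pvMain]
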